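-- pv_equiv track=rewrite | github.com/Vishal1995-dev/Random-Codes | Leetcode-1961.py | isPrefixString
-- ===== SOURCE A (Python) =====
-- def isPrefixString(s, words):
--     """
--     :type s: str
--     :type words: List[str]
--     :rtype: bool
--     """
--     l=len(s)
--     st=""
--     for i in words:
--         st+=i
--         if(len(st)==l and st==s):
--             return True
--         if(len(st)>l):
--             return False
--     return False
-- ===== SOURCE B (Python) =====
-- def isPrefixString(s, words):
--     i = 0
--     n = len(s)
--     for w in words:
--         if s[i:i + len(w)] != w:
--             return False
--         i += len(w)
--         if i == n:
--             return True
--     return False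
-- ===== Notes on version B (the rewrite author's own statement) =====
-- stated objective: alternative
-- what changed: Replaces A's growing concatenation accumulator string (compared whole against s each iteration) with an integer cursor and a per-word slice comparison s[i:i+len(w)] == w, returning False at the first mismatching word; no concatenation is ever built.
import Mathlib
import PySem

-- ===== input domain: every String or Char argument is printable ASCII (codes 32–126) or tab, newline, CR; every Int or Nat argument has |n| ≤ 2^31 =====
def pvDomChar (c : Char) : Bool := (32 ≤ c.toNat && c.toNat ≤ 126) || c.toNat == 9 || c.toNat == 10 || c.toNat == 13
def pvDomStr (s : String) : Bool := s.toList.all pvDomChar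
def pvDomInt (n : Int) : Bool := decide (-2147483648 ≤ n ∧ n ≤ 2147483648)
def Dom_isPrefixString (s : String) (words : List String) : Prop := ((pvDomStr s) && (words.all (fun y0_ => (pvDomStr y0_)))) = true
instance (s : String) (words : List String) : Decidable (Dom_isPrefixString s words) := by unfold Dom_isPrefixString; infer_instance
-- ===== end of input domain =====

-- B replaces A's growing concatenation string with an integer index and per-word slice
-- comparisons (alternative decomposition; no string is ever built).

-- ===== PORT A =====
-- A's loop, over List Char (string concatenation/equality ported via toList, exact on all inputs).
def goA_isPrefixString (s : List Char) (st : List Char) : List String → Bool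
  | [] => false
  | w :: ws =>
    let st' := st ++ w.toList          -- st += i
    if st'.length == s.length && st' == s then true
    else if s.length < st'.length then false
    else goA_isPrefixString s st' ws

def isPrefixString (s : String) (words : List String) : Bool :=
  goA_isPrefixString s.toList [] words

-- ===== PORT B =====
-- B's loop: index i; s[i:i+len(w)] with 0 ≤ i and nonnegative length is exactly take/drop
-- (Python clamps the upper bound just as List.take does).
def goB_isPrefixString (s : List Char) (i : Nat) : List String → Bool
  | [] => false
  | w :: ws =>
    let wl := w.toList
    if ((s.drop i).take wl.length == wl) = false then false
    else if i + wl.length == s.length then true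
    else goB_isPrefixString s (i + wl.length) ws

def isPrefixString_alt (s : String) (words : List String) : Bool :=
  goB_isPrefixString s.toList 0 words

-- ===== PRECONDITION & SPEC =====
def Spec_isPrefixString (s : String) (words : List String) (out : Bool) : Prop := out = isPrefixString_alt s words
instance (s : String) (words : List String) (out : Bool) : Decidable (Spec_isPrefixString s words out) := by unfold Spec_isPrefixString; infer_instance

-- ===== CLAIM (what is proved, stated in full; the proofs are below) =====
def Claim_equal_isPrefixString : Prop := ∀ (s : String) (words : List String), Dom_isPrefixString s words → Spec_isPrefixString s words (isPrefixString s words)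

-- ===== LEMMAS AND PROOFS =====

-- Once A's accumulator stops being a prefix of s, A can only return false.
theorem goA_not_prefix (s : List Char) (ws : List String) :
    ∀ st : List Char, st.length ≤ s.length → ¬ st <+: s →
      goA_isPrefixString s st ws = false := by
  induction ws with
  | nil => intro st _ _; rfl
  | cons w ws ih =>
    intro st hle hnp
    have hnp' : ¬ (st ++ w.toList) <+: s := fun h => hnp ((List.prefix_append st w.toList).trans h)
    simp only [goA_isPrefixString]
    by_cases heq : (st ++ w.toList).length = s.length ∧ st ++ w.toList = s
    · exact absurd (heq.2 ▸ List.prefix_refl s) hnp'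
    · have h1 : ((st ++ w.toList).length == s.length && st ++ w.toList == s) = false := by
        by_cases h : (st ++ w.toList).length = s.length <;> by_cases h2 : st ++ w.toList = s <;>
          simp_all
      rw [h1]
      simp only [if_neg Bool.false_ne_true]
      by_cases hlen : s.length < (st ++ w.toList).length
      · rw [if_pos hlen]
      · rw [if_neg hlen]
        exact ih _ (Nat.le_of_not_lt hlen) hnp'

theorem goA_eq_goB (s : List Char) (ws : List String) :
    ∀ i : Nat, i ≤ s.length →
      goA_isPrefixString s (s.take i) ws = goB_isPrefixString s i ws := by
  induction ws with
  | nil => intro i _; rfl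
  | cons w ws ih =>
    intro i hi
    simp only [goA_isPrefixString, goB_isPrefixString]
    set wl := w.toList with hwl
    have hlen' : (s.take i ++ wl).length = i + wl.length := by
      simp [List.length_take, Nat.min_eq_left hi]
    by_cases hm : (s.drop i).take wl.length = wl
    · -- matching slice: the accumulator is s.take (i + wl.length)
      have hwlen : wl.length ≤ s.length - i := by
        have := congrArg List.length hm
        simp [List.length_take, List.length_drop] at this
        omega
      have hacc : s.take i ++ wl = s.take (i + wl.length) := by
        rw [List.take_add, hm]
      by_cases hend : i + wl.length = s.length
      · have hfull : s.take i ++ wl = s := by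
          rw [hacc, hend, List.take_length]
        simp [hm, hfull, hend]
      · have hlt : i + wl.length < s.length := by omega
        have hc1 : ((s.take i ++ wl).length == s.length && (s.take i ++ wl) == s) = false := by
          simp [hlen', hend]
        rw [hc1]
        simp only [if_neg Bool.false_ne_true]
        have hc2 : ¬ s.length < (s.take i ++ wl).length := by rw [hlen']; omega
        rw [if_neg hc2, hacc]
        have := ih (i + wl.length) (Nat.le_of_lt hlt)
        simp [hm, hend, this]
    · -- mismatching slice: B returns false; A's accumulator is no longer a prefix
      have hbf : ((s.drop i).take wl.length == wl) = false := by simp [hm]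
      have hnp : ¬ (s.take i ++ wl) <+: s := by
        intro hp
        have h := List.prefix_iff_eq_take.mp hp
        rw [hlen', List.take_add] at h
        exact hm (List.append_cancel_left h).symm
      have hne : (s.take i ++ wl) ≠ s := by intro h; exact hnp (by rw [h])
      have hc1 : ((s.take i ++ wl).length == s.length && (s.take i ++ wl) == s) = false := by
        simp [hne]
      rw [hc1, if_pos hbf]
      simp only [if_neg Bool.false_ne_true]
      by_cases hlen : s.length < (s.take i ++ wl).length
      · rw [if_pos hlen]
      · rw [if_neg hlen]
        exact goA_not_prefix s ws _ (Nat.le_of_not_lt hlen) hnp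

-- ===== VERDICT (by name: the statement is the Claim_ definition above) =====
theorem isPrefixString_spec : Claim_equal_isPrefixString := by
  intro s words _
  unfold Spec_isPrefixString isPrefixString isPrefixString_alt
  have := goA_eq_goB s.toList words 0 (Nat.zero_le _)
  simpa using this
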